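-- pv_equiv track=rewrite | github.com/torvalds/linux | tools/testing/kunit/kunit.py | _suites_from_test_list
-- ===== SOURCE A (Python) =====
-- from typing import Iterable, List, Optional, Sequence, Tuple
--
-- def _suites_from_test_list(tests: List[str]) -> List[str]:
-- 	"""Extracts all the suites from an ordered list of tests."""
-- 	suites = []  # type: List[str]
-- 	for t in tests:
-- 		parts = t.split('.', maxsplit=2)
-- 		if len(parts) != 2:
-- 			raise ValueError(f'internal KUnit error, test name should be of the form "<suite>.<test>", got "{t}"')
-- 		suite, case = parts
-- 		if not suites or suites[-1] != suite:
-- 			suites.append(suite)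
-- 	return suites
-- ===== SOURCE B (Python) =====
-- from typing import List
--
-- def _suite_of(t: str) -> str:
-- 	parts = t.split('.', maxsplit=2)
-- 	if len(parts) != 2:
-- 		raise ValueError(f'internal KUnit error, test name should be of the form "<suite>.<test>", got "{t}"')
-- 	return parts[0]
--
-- def _suites_from_test_list(tests: List[str]) -> List[str]:
-- 	"""Extracts all the suites from an ordered list of tests."""
-- 	suites = [_suite_of(t) for t in tests]
-- 	if not suites:
-- 		return []
-- 	return [suites[0]] + [b for a, b in zip(suites, suites[1:]) if a != b]
-- ===== Notes on version B (the rewrite author's own statement) =====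
-- stated objective: idiomatic
-- what changed: Replaces the stateful loop that inspects the output's last element with a two-phase pipeline: map every test to its suite, then collapse adjacent duplicates by zipping the suite list with its own tail and keeping each element that differs from its predecessor.
import Mathlib
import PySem

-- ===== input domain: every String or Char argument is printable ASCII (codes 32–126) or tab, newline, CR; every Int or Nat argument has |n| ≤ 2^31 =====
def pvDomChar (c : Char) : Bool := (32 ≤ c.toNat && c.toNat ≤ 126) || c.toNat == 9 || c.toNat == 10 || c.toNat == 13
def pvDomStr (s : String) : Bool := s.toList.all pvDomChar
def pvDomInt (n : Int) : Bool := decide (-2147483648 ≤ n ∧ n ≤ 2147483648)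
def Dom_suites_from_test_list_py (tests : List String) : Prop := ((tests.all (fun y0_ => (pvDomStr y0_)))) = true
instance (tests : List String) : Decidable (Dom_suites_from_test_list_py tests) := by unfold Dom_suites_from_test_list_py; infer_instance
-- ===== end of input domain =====

-- B replaces A's stateful append-if-last-differs loop by a map-to-suites pass followed by an
-- adjacent-duplicate collapse via zip with the tail (idiomatic pipeline; same O(n) cost).


-- ===== PORT A =====
-- loop of A: for t in tests, split, validate, append suite if new; the ValueError branch
-- (parts.length ≠ 2) returns the accumulator — those inputs are excluded by Pre_.
def pvGoA : List String → List String → List String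
  | [], suites => suites
  | t :: rest, suites =>
    let parts := (PySem.Str.splitMax? t "." 2).getD []
    if parts.length ≠ 2 then suites   -- Python: raise ValueError (outside Pre_)
    else
      let suite := parts.headD ""
      if suites = [] ∨ PySem.List.pyGet? suites (-1) ≠ some suite
      then pvGoA rest (suites ++ [suite])
      else pvGoA rest suites

def suites_from_test_list_py (tests : List String) : List String := pvGoA tests []

-- ===== PORT B =====
-- B's helper _suite_of (its raise branch is outside Pre_; headD "" stands for parts[0])
def pvSuiteOf (t : String) : String :=
  ((PySem.Str.splitMax? t "." 2).getD []).headD ""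

def suites_from_test_list_py_alt (tests : List String) : List String :=
  let suites := tests.map pvSuiteOf
  match suites with
  | [] => []
  | s :: _ =>
    [s] ++ (suites.zip suites.tail).filterMap (fun p => if p.1 ≠ p.2 then some p.2 else none)

-- ===== PRECONDITION & SPEC =====
-- Pre_ excludes exactly the inputs on which A raises ValueError: some test name whose
-- split('.', maxsplit=2) does not have exactly two parts.
def Pre_suites_from_test_list_py (tests : List String) : Prop :=
  ∀ t ∈ tests, ((PySem.Str.splitMax? t "." 2).getD []).length = 2
instance (tests : List String) : Decidable (Pre_suites_from_test_list_py tests) := by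
  unfold Pre_suites_from_test_list_py; infer_instance

def pvWitness_suites_from_test_list_py : List String := ["suite.test", "suite.other", "s2.t"]

def Spec_suites_from_test_list_py (tests : List String) (out : List String) : Prop := out = suites_from_test_list_py_alt tests
instance (tests : List String) (out : List String) : Decidable (Spec_suites_from_test_list_py tests out) := by unfold Spec_suites_from_test_list_py; infer_instance

-- ===== CLAIM (what is proved, stated in full; the proofs are below) =====
def Claim_equal_suites_from_test_list_py : Prop := ∀ (tests : List String), Dom_suites_from_test_list_py tests → Pre_suites_from_test_list_py tests → Spec_suites_from_test_list_py tests (suites_from_test_list_py tests)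

-- ===== LEMMAS AND PROOFS =====

-- reference: collapse adjacent duplicates, given the previous kept element
def pvCollapse : Option String → List String → List String
  | _, [] => []
  | prev, s :: l => if prev = some s then pvCollapse prev l else s :: pvCollapse (some s) l

theorem pvPyGet_neg_one (l : List String) : PySem.List.pyGet? l (-1) = l.getLast? := by
  simp only [PySem.List.pyGet?, PySem.List.pyIdx?, Int.reduceNeg, Int.neg_nonneg, Int.reduceLE,
    ↓reduceIte, neg_le_neg_iff, Nat.one_le_cast, neg_neg, Int.toNat_one]
  cases l with
  | nil => rfl
  | cons a t => simp [List.getLast?_eq_getElem?]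

theorem pvZip_eq_collapse (s : String) (l : List String) :
    ((s :: l).zip l).filterMap (fun p => if p.1 ≠ p.2 then some p.2 else none)
      = pvCollapse (some s) l := by
  induction l generalizing s with
  | nil => rfl
  | cons a l ih =>
    by_cases h : s = a
    · subst h
      show List.filterMap _ ((s, s) :: (s :: l).zip l) = _
      rw [List.filterMap_cons_none (by simp), ih]
      simp [pvCollapse]
    · show List.filterMap _ ((s, a) :: (a :: l).zip l) = _
      rw [List.filterMap_cons_some (b := a) (by simp [h]), ih]
      simp [pvCollapse, h]

theorem pvGoA_eq (tests : List String)
    (hpre : ∀ t ∈ tests, ((PySem.Str.splitMax? t "." 2).getD []).length = 2) :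
    ∀ acc, pvGoA tests acc = acc ++ pvCollapse acc.getLast? (tests.map pvSuiteOf) := by
  induction tests with
  | nil => intro acc; simp [pvGoA, pvCollapse]
  | cons t rest ih =>
    intro acc
    have ht : ((PySem.Str.splitMax? t "." 2).getD []).length = 2 :=
      hpre t (List.mem_cons_self ..)
    have hrest := ih (fun x hx => hpre x (List.mem_cons_of_mem _ hx))
    simp only [pvGoA, ht, pvSuiteOf, List.map_cons]
    set suite := ((PySem.Str.splitMax? t "." 2).getD []).headD "" with hs
    rw [pvPyGet_neg_one]
    by_cases hc : acc = [] ∨ acc.getLast? ≠ some suite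
    · rw [if_pos hc, hrest]
      have hlast : (acc ++ [suite]).getLast? = some suite := by simp
      rw [hlast]
      have hne : acc.getLast? ≠ some suite := by
        rcases hc with h | h
        · subst h; simp
        · exact h
      simp [pvCollapse, if_neg hne]
    · rw [if_neg hc]
      have h2 : acc.getLast? = some suite := by
        by_contra h; exact hc (Or.inr h)
      rw [hrest, h2]
      simp [pvCollapse]

-- ===== VERDICT (by name: the statement is the Claim_ definition above) =====
theorem suites_from_test_list_py_spec : Claim_equal_suites_from_test_list_py := by
  intro tests _ hpre
  unfold Spec_suites_from_test_list_py suites_from_test_list_py suites_from_test_list_py_alt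
  rw [pvGoA_eq tests hpre []]
  cases h : tests.map pvSuiteOf with
  | nil => simp [pvCollapse]
  | cons s l =>
    simp only [List.nil_append, List.tail_cons]
    rw [pvZip_eq_collapse]
    simp [pvCollapse]
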